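-- pv_equiv track=rewrite | github.com/royk255/cloud_royk | client.py | check_text
-- ===== SOURCE A (Python) =====
-- def check_text(text):
--     alowed_chars = set("abcdefghijklmnopqrstuvwxyzABCDEFGHIJKLMNOPQRSTUVWXYZ0123456789_")
--     if len(text) == 0:
--         return False
--     for char in text:
--         if char not in alowed_chars:
--             return False
--     return True
-- ===== SOURCE B (Python) =====
-- import re
--
-- _ALLOWED = re.compile(r'[A-Za-z0-9_]+')
--
-- def check_text(text):
--     return bool(_ALLOWED.fullmatch(text))
-- ===== Notes on version B (the rewrite author's own statement) =====
-- stated objective: idiomatic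
-- what changed: The explicit set construction and per-character loop with early return are replaced by a single precompiled regular-expression fullmatch over the class [A-Za-z0-9_]+, whose + also enforces non-emptiness; the C-level regex scan beats the interpreted per-character loop by a constant factor.
import Mathlib
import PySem

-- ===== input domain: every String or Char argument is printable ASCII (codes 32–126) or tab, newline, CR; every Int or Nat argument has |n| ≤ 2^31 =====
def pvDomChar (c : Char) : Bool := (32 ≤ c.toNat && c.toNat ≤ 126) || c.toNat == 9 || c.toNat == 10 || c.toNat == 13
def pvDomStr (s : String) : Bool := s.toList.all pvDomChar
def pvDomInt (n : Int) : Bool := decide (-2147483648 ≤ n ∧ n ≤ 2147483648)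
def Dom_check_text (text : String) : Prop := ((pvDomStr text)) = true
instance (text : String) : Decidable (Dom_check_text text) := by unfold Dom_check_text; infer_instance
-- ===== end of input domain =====

-- B replaces A's allowed-set loop by a single character-class full match (non-empty ∧ every char in [A-Za-z0-9_]): more idiomatic, same cost.


-- ===== PORT A =====
-- the literal allowed-character set A builds
def pvAllowedSetA : PySem.Set Char :=
  PySem.Set.ofList "abcdefghijklmnopqrstuvwxyzABCDEFGHIJKLMNOPQRSTUVWXYZ0123456789_".toList

-- the for-loop with early return: first disallowed char yields False
def checkLoopA : List Char → Bool
  | [] => true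
  | c :: rest => if ¬ (PySem.Set.contains pvAllowedSetA c) then false else checkLoopA rest

def check_text (text : String) : Bool :=
  if PySem.Str.len text = 0 then false else checkLoopA text.toList

-- ===== PORT B =====
-- regex fullmatch of [A-Za-z0-9_]+ : the character class as a predicate, '+' = non-empty ∧ all
def pvClassB (c : Char) : Bool :=
  ('A' ≤ c && c ≤ 'Z') || ('a' ≤ c && c ≤ 'z') || ('0' ≤ c && c ≤ '9') || c == '_'

def check_text_alt (text : String) : Bool :=
  !text.toList.isEmpty && text.toList.all pvClassB

-- ===== PRECONDITION & SPEC =====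
def Spec_check_text (text : String) (out : Bool) : Prop := out = check_text_alt text
instance (text : String) (out : Bool) : Decidable (Spec_check_text text out) := by unfold Spec_check_text; infer_instance

-- ===== CLAIM (what is proved, stated in full; the proofs are below) =====
def Claim_equal_check_text : Prop := ∀ (text : String), Dom_check_text text → Spec_check_text text (check_text text)

-- ===== LEMMAS AND PROOFS =====
-- on chars inside Dom, membership in A's allowed set agrees with B's character class
set_option maxRecDepth 4000 in
theorem allowed_eq_class (c : Char) (h : pvDomChar c = true) :
    PySem.Set.contains pvAllowedSetA c = pvClassB c := by
  have hlt : c.toNat < 127 := by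
    simp [pvDomChar] at h
    omega
  have hall : ∀ n : Fin 127,
      PySem.Set.contains pvAllowedSetA (Char.ofNat n) = pvClassB (Char.ofNat n) := by
    decide
  have := hall ⟨c.toNat, hlt⟩
  simpa [Char.ofNat_toNat] using this

theorem loopA_eq_all (l : List Char) (h : ∀ c ∈ l, pvDomChar c = true) :
    checkLoopA l = l.all pvClassB := by
  induction l with
  | nil => rfl
  | cons c rest ih =>
    have hc := allowed_eq_class c (h c (by simp))
    have ih' := ih (fun x hx => h x (by simp [hx]))
    simp only [checkLoopA]
    rw [hc]
    by_cases hm : pvClassB c = true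
    · simp [hm, ih']
    · simp [hm]

-- ===== VERDICT (by name: the statement is the Claim_ definition above) =====
theorem check_text_spec : Claim_equal_check_text := by
  intro text hdom
  unfold Spec_check_text check_text check_text_alt
  have hchars : ∀ c ∈ text.toList, pvDomChar c = true := by
    simpa [Dom_check_text, pvDomStr, List.all_eq_true] using hdom
  rw [loopA_eq_all text.toList hchars]
  rcases h : text.toList with _ | ⟨c, rest⟩
  · simp [PySem.Str.len_eq, h]
  · simp [PySem.Str.len_eq, h]
    intro _ _
    omega
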